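-- pv_equiv track=rewrite | github.com/ChristerNilsson/2021 | 017-packing-boxes/morabito.py | createSW
-- ===== SOURCE A (Python) =====
-- def createSW(L,W,l,w):
-- 	res = []
-- 	for r in range(L):
-- 		y0 = r*l
-- 		if y0 > W: continue
-- 		for s in range(W):
-- 			y = y0 + s*w
-- 			if y<=W and y not in res: res.append(y)
-- 	res.sort()
-- 	return res
-- ===== SOURCE B (Python) =====
-- def createSW(L, W, l, w):
--     # Build each row r as an already-sorted, duplicate-free arithmetic
--     # progression (closed form per sign of w), then fold the rows together
--     # with a linear two-pointer merge that drops duplicates.  No sort, no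
--     # set, no per-element membership scan.
--     def merge(a, b):
--         out = []
--         i = j = 0
--         while i < len(a) and j < len(b):
--             x, y = a[i], b[j]
--             if x < y:
--                 out.append(x); i += 1
--             elif y < x:
--                 out.append(y); j += 1
--             else:
--                 out.append(x); i += 1; j += 1
--         out.extend(a[i:])
--         out.extend(b[j:])
--         return out
--
--     res = []
--     for r in range(L):
--         y0 = r * l
--         if y0 > W:
--             continue
--         if W <= 0:
--             row = []
--         elif w > 0:
--             cnt = min(W, (W - y0) // w + 1)
--             row = [y0 + s * w for s in range(cnt)]
--         elif w == 0:
--             row = [y0]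
--         else:
--             row = [y0 + s * w for s in range(W - 1, -1, -1)]
--         res = merge(res, row)
--     return res
-- ===== Notes on version B (the rewrite author's own statement) =====
-- stated objective: faster
-- what changed: B builds each row r as an already-sorted duplicate-free arithmetic progression in closed form (per sign of w) and folds the rows together with a two-pointer dedup merge, so there is no final sort, no set, and no per-element 'y not in res' membership scan.
import Mathlib
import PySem

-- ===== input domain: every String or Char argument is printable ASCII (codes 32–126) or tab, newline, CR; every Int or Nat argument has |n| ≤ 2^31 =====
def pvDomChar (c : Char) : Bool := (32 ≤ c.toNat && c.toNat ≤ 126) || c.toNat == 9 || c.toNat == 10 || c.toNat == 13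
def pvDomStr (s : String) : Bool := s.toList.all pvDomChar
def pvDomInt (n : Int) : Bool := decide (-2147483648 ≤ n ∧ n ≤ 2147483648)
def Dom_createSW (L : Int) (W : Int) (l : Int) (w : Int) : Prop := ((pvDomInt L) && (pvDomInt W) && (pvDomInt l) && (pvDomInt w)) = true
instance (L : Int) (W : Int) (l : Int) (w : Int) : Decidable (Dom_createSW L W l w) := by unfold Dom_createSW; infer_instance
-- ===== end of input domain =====

-- B builds each row as an already-sorted duplicate-free arithmetic progression and
-- folds the rows together with a two-pointer dedup merge — no sort, no set, no
-- per-element membership scan (objective: faster).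

-- ===== PORT A =====
def createSW (L : Int) (W : Int) (l : Int) (w : Int) : List Int :=
  let res : List Int :=
    (PySem.List.pyRange 0 L 1).foldl
      (fun res r =>
        let y0 := r * l
        if y0 > W then res
        else
          (PySem.List.pyRange 0 W 1).foldl
            (fun res s =>
              let y := y0 + s * w
              if y ≤ W ∧ y ∉ res then res ++ [y] else res)
            res)
      []
  PySem.List.sorted res (fun x => x)

-- ===== PORT B =====
-- two-pointer merge of two lists, keeping one copy of a value present in both
def pvMerge : List Int → List Int → List Int
  | [], b => b
  | a, [] => a
  | x :: a, y :: b =>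
      if x < y then x :: pvMerge a (y :: b)
      else if y < x then y :: pvMerge (x :: a) b
      else x :: pvMerge a b
termination_by a b => a.length + b.length

-- the sorted duplicate-free row for a given y0 = r*l (closed form per sign of w)
def pvRow (W : Int) (w : Int) (y0 : Int) : List Int :=
  if W ≤ 0 then []
  else if w > 0 then
    (PySem.List.pyRange 0 (min W (PySem.Int.floordiv (W - y0) w + 1)) 1).map
      (fun s => y0 + s * w)
  else if w = 0 then [y0]
  else (PySem.List.pyRange (W - 1) (-1) (-1)).map (fun s => y0 + s * w)

def createSW_alt (L : Int) (W : Int) (l : Int) (w : Int) : List Int :=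
  (PySem.List.pyRange 0 L 1).foldl
    (fun res r =>
      let y0 := r * l
      if y0 > W then res
      else pvMerge res (pvRow W w y0))
    []

-- ===== PRECONDITION & SPEC =====
def Spec_createSW (L : Int) (W : Int) (l : Int) (w : Int) (out : List Int) : Prop := out = createSW_alt L W l w
instance (L : Int) (W : Int) (l : Int) (w : Int) (out : List Int) : Decidable (Spec_createSW L W l w out) := by unfold Spec_createSW; infer_instance

-- ===== CLAIM (what is proved, stated in full; the proofs are below) =====
def Claim_equal_createSW : Prop := ∀ (L : Int) (W : Int) (l : Int) (w : Int), Dom_createSW L W l w → Spec_createSW L W l w (createSW L W l w)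

-- ===== LEMMAS AND PROOFS =====

-- membership in a fold whose step adds elements described by Q
theorem pv_mem_foldl_step {β : Type} (g : List Int → β → List Int) (Q : β → Int → Prop)
    (h : ∀ acc x v, v ∈ g acc x ↔ v ∈ acc ∨ Q x v) :
    ∀ (xs : List β) (acc : List Int) (v : Int),
      v ∈ xs.foldl g acc ↔ v ∈ acc ∨ ∃ x ∈ xs, Q x v := by
  intro xs
  induction xs with
  | nil => simp
  | cons x xs ih =>
    intro acc v
    simp only [List.foldl_cons, ih, h, List.mem_cons]
    constructor
    · rintro ((hv | hq) | ⟨y, hy, hQ⟩)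
      · exact Or.inl hv
      · exact Or.inr ⟨x, Or.inl rfl, hq⟩
      · exact Or.inr ⟨y, Or.inr hy, hQ⟩
    · rintro (hv | ⟨y, (rfl | hy), hQ⟩)
      · exact Or.inl (Or.inl hv)
      · exact Or.inl (Or.inr hQ)
      · exact Or.inr ⟨y, hy, hQ⟩

-- a fold whose step preserves a predicate yields a list satisfying it
theorem pv_pred_foldl_step {β : Type} (P : List Int → Prop) (g : List Int → β → List Int)
    (h : ∀ acc x, P acc → P (g acc x)) :
    ∀ (xs : List β) (acc : List Int), P acc → P (xs.foldl g acc) := by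
  intro xs
  induction xs with
  | nil => intro acc hacc; simpa using hacc
  | cons x xs ih => intro acc hacc; exact ih (g acc x) (h acc x hacc)

-- membership in A's accumulated list
theorem pv_mem_resA (L W l w : Int) (v : Int) :
    v ∈ (PySem.List.pyRange 0 L 1).foldl
          (fun res r =>
            let y0 := r * l
            if y0 > W then res
            else
              (PySem.List.pyRange 0 W 1).foldl
                (fun res s =>
                  let y := y0 + s * w
                  if y ≤ W ∧ y ∉ res then res ++ [y] else res)
                res)
          [] ↔
      ∃ r, 0 ≤ r ∧ r < L ∧ r * l ≤ W ∧
        ∃ s, 0 ≤ s ∧ s < W ∧ r * l + s * w ≤ W ∧ v = r * l + s * w := by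
  have hinner : ∀ (r : Int) (acc : List Int) (v : Int),
      v ∈ (PySem.List.pyRange 0 W 1).foldl
            (fun res s =>
              let y := r * l + s * w
              if y ≤ W ∧ y ∉ res then res ++ [y] else res)
            acc ↔
        v ∈ acc ∨ ∃ s ∈ PySem.List.pyRange 0 W 1, r * l + s * w ≤ W ∧ v = r * l + s * w := by
    intro r acc v
    refine pv_mem_foldl_step _ (fun s v => r * l + s * w ≤ W ∧ v = r * l + s * w) ?_ _ acc v
    intro acc s v
    by_cases h1 : r * l + s * w ≤ W
    · by_cases h2 : (r * l + s * w) ∈ acc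
      · simp only [h1, h2, not_true, and_false, if_false]
        constructor
        · exact fun hv => Or.inl hv
        · rintro (hv | ⟨_, rfl⟩) <;> [exact hv; exact h2]
      · simp only [h1, h2, not_false_iff, and_self, if_true, List.mem_append,
          List.mem_singleton]
        tauto
    · simp only [h1, false_and, if_false]
      tauto
  rw [pv_mem_foldl_step
      (fun res r =>
        let y0 := r * l
        if y0 > W then res
        else
          (PySem.List.pyRange 0 W 1).foldl
            (fun res s =>
              let y := y0 + s * w
              if y ≤ W ∧ y ∉ res then res ++ [y] else res)
            res)
      (fun r v => r * l ≤ W ∧ ∃ s ∈ PySem.List.pyRange 0 W 1,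
          r * l + s * w ≤ W ∧ v = r * l + s * w)
      (by
        intro acc r v
        by_cases hr : r * l > W
        · simp only [hr, if_true]
          constructor
          · exact fun hv => Or.inl hv
          · rintro (hv | ⟨hle, _⟩) <;> [exact hv; omega]
        · simp only [hr, if_false]
          rw [hinner r acc v]
          constructor
          · rintro (hv | hs) <;> [exact Or.inl hv; exact Or.inr ⟨by omega, hs⟩]
          · rintro (hv | ⟨_, hs⟩) <;> [exact Or.inl hv; exact Or.inr hs])]
  simp only [List.not_mem_nil, false_or, PySem.List.mem_pyRange_one]
  constructor
  · rintro ⟨r, ⟨hr0, hrL⟩, hle, s, ⟨hs0, hsW⟩, hcond, rfl⟩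
    exact ⟨r, hr0, hrL, hle, s, hs0, hsW, hcond, rfl⟩
  · rintro ⟨r, hr0, hrL, hle, s, hs0, hsW, hcond, rfl⟩
    exact ⟨r, ⟨hr0, hrL⟩, hle, s, ⟨hs0, hsW⟩, hcond, rfl⟩

-- A's accumulated list has no duplicates
theorem pv_nodup_resA (L W l w : Int) :
    ((PySem.List.pyRange 0 L 1).foldl
      (fun res r =>
        let y0 := r * l
        if y0 > W then res
        else
          (PySem.List.pyRange 0 W 1).foldl
            (fun res s =>
              let y := y0 + s * w
              if y ≤ W ∧ y ∉ res then res ++ [y] else res)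
            res)
      []).Nodup := by
  refine pv_pred_foldl_step List.Nodup _ ?_ _ [] List.nodup_nil
  intro acc r hacc
  by_cases hr : r * l > W
  · simpa [hr] using hacc
  · simp only [hr, if_false]
    refine pv_pred_foldl_step List.Nodup _ ?_ _ acc hacc
    intro acc2 s h2
    by_cases hc : r * l + s * w ≤ W ∧ (r * l + s * w) ∉ acc2
    · rw [if_pos hc]
      refine List.nodup_append.mpr ⟨h2, List.nodup_singleton _, ?_⟩
      intro a ha b hb
      simp only [List.mem_singleton] at hb
      subst hb
      exact fun h => hc.2 (h ▸ ha)
    · simpa [hc] using h2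

-- merge: membership is the union of the memberships
theorem pv_mem_merge (a b : List Int) (v : Int) :
    v ∈ pvMerge a b ↔ v ∈ a ∨ v ∈ b := by
  induction a, b using pvMerge.induct with
  | case1 b => simp [pvMerge]
  | case2 a h => cases a <;> simp_all [pvMerge]
  | case3 x a y b h1 ih =>
    rw [pvMerge]; simp only [if_pos h1, List.mem_cons, ih]; tauto
  | case4 x a y b h1 h2 ih =>
    rw [pvMerge]; simp only [if_neg h1, if_pos h2, List.mem_cons, ih]; tauto
  | case5 x a y b h1 h2 ih =>
    rw [pvMerge]
    have hxy : x = y := by omega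
    simp only [if_neg h1, if_neg h2, List.mem_cons, ih]
    subst hxy; tauto

-- merge of two strictly increasing lists is strictly increasing
theorem pv_pairwise_merge (a b : List Int)
    (ha : a.Pairwise (· < ·)) (hb : b.Pairwise (· < ·)) :
    (pvMerge a b).Pairwise (· < ·) := by
  induction a, b using pvMerge.induct with
  | case1 b => simpa [pvMerge] using hb
  | case2 a h => cases a <;> simp_all [pvMerge]
  | case3 x a y b h1 ih =>
    rw [pvMerge, if_pos h1]
    rw [List.pairwise_cons] at ha ⊢
    refine ⟨?_, ih ha.2 hb⟩
    intro v hv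
    rcases (pv_mem_merge _ _ v).mp hv with h | h
    · exact ha.1 v h
    · rcases List.mem_cons.mp h with rfl | h
      · exact h1
      · exact lt_trans h1 ((List.pairwise_cons.mp hb).1 v h)
  | case4 x a y b h1 h2 ih =>
    rw [pvMerge, if_neg h1, if_pos h2]
    rw [List.pairwise_cons] at hb ⊢
    refine ⟨?_, ih ha hb.2⟩
    intro v hv
    rcases (pv_mem_merge _ _ v).mp hv with h | h
    · rcases List.mem_cons.mp h with rfl | h
      · exact h2
      · exact lt_trans h2 ((List.pairwise_cons.mp ha).1 v h)
    · exact hb.1 v h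
  | case5 x a y b h1 h2 ih =>
    rw [pvMerge, if_neg h1, if_neg h2]
    have hxy : x = y := by omega
    rw [List.pairwise_cons] at ha hb ⊢
    refine ⟨?_, ih ha.2 hb.2⟩
    intro v hv
    rcases (pv_mem_merge _ _ v).mp hv with h | h
    · exact ha.1 v h
    · exact hxy ▸ hb.1 v h

-- each row is strictly increasing
theorem pv_pairwise_row (W w y0 : Int) : (pvRow W w y0).Pairwise (· < ·) := by
  unfold pvRow
  split_ifs with h1 h2 h3
  · exact List.Pairwise.nil
  · refine List.Pairwise.map _ ?_ (PySem.List.pairwise_lt_pyRange_one 0 _)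
    intro a b hab
    have := mul_lt_mul_of_pos_right hab h2
    omega
  · simp
  · rw [PySem.List.pyRange_neg_one_eq_reverse]
    refine List.Pairwise.map (R := fun a b : Int => b < a) _ ?_ ?_
    · intro a b hab
      have hw : w < 0 := by omega
      have := mul_lt_mul_of_neg_right hab hw
      omega
    · rw [List.pairwise_reverse]
      exact (PySem.List.pairwise_lt_pyRange_one ((-1) + 1) (W - 1 + 1)).imp (fun h => h)

-- per row, membership matches exactly A's admissible inner values
theorem pv_mem_row (W w y0 v : Int) (hy0 : y0 ≤ W) :
    v ∈ pvRow W w y0 ↔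
      ∃ s, 0 ≤ s ∧ s < W ∧ y0 + s * w ≤ W ∧ v = y0 + s * w := by
  unfold pvRow
  split_ifs with h1 h2 h3
  · simp only [List.not_mem_nil, false_iff]
    rintro ⟨s, hs0, hsW, _, _⟩; omega
  · simp only [List.mem_map, PySem.List.mem_pyRange_one]
    constructor
    · rintro ⟨s, ⟨hs0, hcnt⟩, rfl⟩
      have hW : s < W := lt_of_lt_of_le hcnt (min_le_left _ _)
      have h2' : s ≤ PySem.Int.floordiv (W - y0) w := by
        have := lt_of_lt_of_le hcnt (min_le_right _ _)
        omega
      have h3' : s * w ≤ W - y0 := (PySem.Int.le_floordiv_iff_mul_le h2).mp h2'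
      exact ⟨s, hs0, hW, by omega, rfl⟩
    · rintro ⟨s, hs0, hsW, hle, rfl⟩
      have h2' : s ≤ PySem.Int.floordiv (W - y0) w :=
        (PySem.Int.le_floordiv_iff_mul_le h2).mpr (by omega)
      exact ⟨s, ⟨hs0, by omega⟩, rfl⟩
  · subst h3
    simp only [List.mem_singleton]
    constructor
    · rintro rfl; exact ⟨0, le_refl _, by omega, by omega, by ring⟩
    · rintro ⟨s, _, _, _, rfl⟩; ring
  · have hw : w < 0 := by omega
    simp only [List.mem_map, PySem.List.mem_pyRange_neg_one]
    constructor
    · rintro ⟨s, ⟨hs0, hsW⟩, rfl⟩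
      have : s * w ≤ 0 := mul_nonpos_of_nonneg_of_nonpos (by omega) (by omega)
      exact ⟨s, by omega, by omega, by omega, rfl⟩
    · rintro ⟨s, hs0, hsW, _, rfl⟩
      exact ⟨s, ⟨by omega, by omega⟩, rfl⟩

-- B's result is strictly increasing
theorem pv_pairwise_B (L W l w : Int) :
    (createSW_alt L W l w).Pairwise (· < ·) := by
  unfold createSW_alt
  refine pv_pred_foldl_step (List.Pairwise (· < ·)) _ ?_ _ [] List.Pairwise.nil
  intro acc r hacc
  by_cases hr : r * l > W
  · simpa [hr] using hacc
  · simp only [hr, if_false]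
    exact pv_pairwise_merge _ _ hacc (pv_pairwise_row W w (r * l))

-- membership in B's result
theorem pv_mem_B (L W l w : Int) (v : Int) :
    v ∈ createSW_alt L W l w ↔
      ∃ r, 0 ≤ r ∧ r < L ∧ r * l ≤ W ∧
        ∃ s, 0 ≤ s ∧ s < W ∧ r * l + s * w ≤ W ∧ v = r * l + s * w := by
  unfold createSW_alt
  rw [pv_mem_foldl_step
      (fun res r =>
        let y0 := r * l
        if y0 > W then res
        else pvMerge res (pvRow W w y0))
      (fun r v => r * l ≤ W ∧
        ∃ s, 0 ≤ s ∧ s < W ∧ r * l + s * w ≤ W ∧ v = r * l + s * w)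
      (by
        intro acc r v
        by_cases hr : r * l > W
        · simp only [hr, if_true]
          constructor
          · exact fun hv => Or.inl hv
          · rintro (hv | ⟨hle, _⟩) <;> [exact hv; omega]
        · simp only [hr, if_false, pv_mem_merge]
          rw [pv_mem_row W w (r * l) v (by omega)]
          constructor
          · rintro (hv | hs) <;> [exact Or.inl hv; exact Or.inr ⟨by omega, hs⟩]
          · rintro (hv | ⟨_, hs⟩) <;> [exact Or.inl hv; exact Or.inr hs])]
  simp only [List.not_mem_nil, false_or, PySem.List.mem_pyRange_one]
  constructor
  · rintro ⟨r, ⟨hr0, hrL⟩, hle, hs⟩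
    exact ⟨r, hr0, hrL, hle, hs⟩
  · rintro ⟨r, hr0, hrL, hle, hs⟩
    exact ⟨r, ⟨hr0, hrL⟩, hle, hs⟩

-- ===== VERDICT (by name: the statement is the Claim_ definition above) =====
theorem createSW_spec : Claim_equal_createSW := by
  intro L W l w _
  unfold Spec_createSW
  show createSW L W l w = createSW_alt L W l w
  have hperm : (createSW_alt L W l w).Perm
      ((PySem.List.pyRange 0 L 1).foldl
        (fun res r =>
          let y0 := r * l
          if y0 > W then res
          else
            (PySem.List.pyRange 0 W 1).foldl
              (fun res s =>
                let y := y0 + s * w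
                if y ≤ W ∧ y ∉ res then res ++ [y] else res)
              res)
        []) := by
    rw [List.perm_ext_iff_of_nodup
      ((pv_pairwise_B L W l w).imp (fun h => ne_of_lt h)) (pv_nodup_resA L W l w)]
    intro v
    rw [pv_mem_B L W l w v, pv_mem_resA L W l w v]
  exact PySem.List.sorted_eq_of_perm_of_pairwise_lt _ _ (fun x => x) hperm (pv_pairwise_B L W l w)
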